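-- pv_equiv track=rewrite | github.com/hustlestar/real-media-empire | src/pipelines/tasks/image_tasks.py | split_string_into_three_groups_max
-- ===== SOURCE A (Python) =====
-- def split_string_into_three_groups_max(s):
--     words = s.split()
--     n = len(words)
--     if n <= 3:
--         return words
--     avg = n // 3
--     remainder = n % 3
--     groups = []
--     i = 0
--     while i < n:
--         group_size = avg + (1 if remainder > 0 else 0)
--         groups.append(" ".join(words[i:i+group_size]))
--         i += group_size
--         remainder -= 1
--     return groups
-- ===== SOURCE B (Python) =====
-- def split_string_into_three_groups_max(s):
--     words = s.split()
--     n = len(words)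
--     if n <= 3:
--         return words
--     return [" ".join(words[(j * n + 2) // 3:((j + 1) * n + 2) // 3]) for j in range(3)]
-- ===== Notes on version B (the rewrite author's own statement) =====
-- stated objective: simpler
-- what changed: Replaces A's stateful while-loop that distributes the remainder by decrementing a counter with a single comprehension over closed-form ceil-style group boundaries (j*n+2)//3.
import Mathlib
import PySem

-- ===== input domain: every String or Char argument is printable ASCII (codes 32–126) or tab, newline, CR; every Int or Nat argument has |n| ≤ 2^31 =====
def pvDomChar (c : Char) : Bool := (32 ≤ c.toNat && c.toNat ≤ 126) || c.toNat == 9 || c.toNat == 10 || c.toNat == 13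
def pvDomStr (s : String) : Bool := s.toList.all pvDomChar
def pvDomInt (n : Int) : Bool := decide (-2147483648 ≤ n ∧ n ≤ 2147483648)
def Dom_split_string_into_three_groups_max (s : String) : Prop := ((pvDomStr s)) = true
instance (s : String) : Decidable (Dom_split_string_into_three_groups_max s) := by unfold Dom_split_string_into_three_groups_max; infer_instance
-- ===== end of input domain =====

-- B replaces A's stateful remainder-distributing while-loop by closed-form ceil-style
-- group boundaries (j*n+2)//3 (objective: simpler).

-- ===== PORT A =====
-- the while-loop of A; fuel only makes the recursion total, it is never exhausted
def pvLoopA (words : List String) (n avg : Int) (i remainder : Int)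
    (groups : List String) : Nat → List String
  | 0 => groups
  | Nat.succ f =>
    if i < n then
      let group_size := avg + (if 0 < remainder then 1 else 0)
      pvLoopA words n avg (i + group_size) (remainder - 1)
        (groups ++ [PySem.Str.join " " (PySem.List.slice words (some i) (some (i + group_size)))]) f
    else groups

def split_string_into_three_groups_max (s : String) : List String :=
  let words := PySem.Str.split₀ s
  let n : Int := words.length
  if n ≤ 3 then words
  else
    let avg := PySem.Int.floordiv n 3
    let remainder := PySem.Int.mod n 3
    pvLoopA words n avg 0 remainder [] (words.length + 1)

-- ===== PORT B =====
def split_string_into_three_groups_max_alt (s : String) : List String :=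
  let words := PySem.Str.split₀ s
  let n : Int := words.length
  if n ≤ 3 then words
  else
    (PySem.List.pyRange 0 3 1).map (fun j =>
      PySem.Str.join " " (PySem.List.slice words
        (some (PySem.Int.floordiv (j * n + 2) 3))
        (some (PySem.Int.floordiv ((j + 1) * n + 2) 3))))

-- ===== PRECONDITION & SPEC =====
def Spec_split_string_into_three_groups_max (s : String) (out : List String) : Prop := out = split_string_into_three_groups_max_alt s
instance (s : String) (out : List String) : Decidable (Spec_split_string_into_three_groups_max s out) := by unfold Spec_split_string_into_three_groups_max; infer_instance

-- ===== CLAIM (what is proved, stated in full; the proofs are below) =====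
def Claim_equal_split_string_into_three_groups_max : Prop := ∀ (s : String), Dom_split_string_into_three_groups_max s → Spec_split_string_into_three_groups_max s (split_string_into_three_groups_max s)

-- ===== LEMMAS AND PROOFS =====

theorem pvLoopA_succ (words : List String) (n avg i r : Int) (g : List String) (f : Nat)
    (h : i < n) :
    pvLoopA words n avg i r g (f + 1) =
      pvLoopA words n avg (i + (avg + if 0 < r then 1 else 0)) (r - 1)
        (g ++ [PySem.Str.join " " (PySem.List.slice words (some i)
          (some (i + (avg + if 0 < r then 1 else 0))))]) f := by
  simp [pvLoopA, h]

theorem pvLoopA_stop (words : List String) (n avg i r : Int) (g : List String) (f : Nat)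
    (h : ¬ i < n) : pvLoopA words n avg i r g f = g := by
  cases f <;> simp [pvLoopA, h]

-- ===== VERDICT (by name: the statement is the Claim_ definition above) =====
theorem split_string_into_three_groups_max_spec : Claim_equal_split_string_into_three_groups_max := by
  intro s _
  unfold Spec_split_string_into_three_groups_max split_string_into_three_groups_max split_string_into_three_groups_max_alt
  set words := PySem.Str.split₀ s with hw
  by_cases h : ((words.length : Int) ≤ 3)
  · simp [h]
  · simp only [h, if_neg, not_false_iff]
    push Not at h
    have hmod := PySem.Int.floordiv_mul_add_mod (words.length : Int) 3
    have hr0 : 0 ≤ PySem.Int.mod (words.length:Int) 3 := PySem.Int.mod_nonneg _ (by norm_num)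
    have hr3 : PySem.Int.mod (words.length:Int) 3 < 3 := PySem.Int.mod_lt _ (by norm_num)
    set a := PySem.Int.floordiv (words.length:Int) 3 with hadef
    set r := PySem.Int.mod (words.length:Int) 3 with hrdef
    obtain ⟨k, hk⟩ : ∃ k, words.length = k + 4 := ⟨words.length - 4, by omega⟩
    rw [hk]
    rw [pvLoopA_succ _ _ _ _ _ _ _ (by push_cast; omega)]
    rw [pvLoopA_succ _ _ _ _ _ _ _ (by split_ifs <;> push_cast <;> omega)]
    rw [pvLoopA_succ _ _ _ _ _ _ _ (by split_ifs <;> push_cast <;> omega)]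
    rw [pvLoopA_stop _ _ _ _ _ _ _ (by split_ifs <;> push_cast <;> omega)]
    have hrg : PySem.List.pyRange 0 3 1 = [0, 1, 2] := by decide
    rw [hrg]
    simp only [List.map_cons, List.map_nil, List.nil_append, List.singleton_append]
    push_cast
    have e1 : PySem.Int.floordiv ((1:ℤ) * ((k:ℤ)+4) + 2) 3 = 0 + (a + if 0 < r then 1 else 0) := by
      rw [PySem.Int.floordiv_eq_iff_of_pos (by norm_num)]; split_ifs <;> omega
    have e2 : PySem.Int.floordiv ((2:ℤ) * ((k:ℤ)+4) + 2) 3 = 0 + (a + if 0 < r then 1 else 0) + (a + if 0 < r - 1 then 1 else 0) := by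
      rw [PySem.Int.floordiv_eq_iff_of_pos (by norm_num)]; split_ifs <;> omega
    have e3 : PySem.Int.floordiv ((3:ℤ) * ((k:ℤ)+4) + 2) 3 = 0 + (a + if 0 < r then 1 else 0) + (a + if 0 < r - 1 then 1 else 0) + (a + if 0 < r - 1 - 1 then 1 else 0) := by
      rw [PySem.Int.floordiv_eq_iff_of_pos (by norm_num)]; split_ifs <;> omega
    rw [e1, e2, e3]
    simp
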